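-- pv_equiv track=rewrite | github.com/christu2/fantasyScripts | fantasyScript.py | _get_scarcity_alerts
-- ===== SOURCE A (Python) =====
-- from typing import Dict, List, Tuple, Optional
--
-- def _get_scarcity_alerts(available_players: List[Dict], needs: Dict) -> List[str]:
--     """Alert about position scarcity"""
--     alerts = []
--
--     for position in ['QB', 'RB', 'WR', 'TE']:
--         if needs.get(position, 0) > 0:
--             position_players = [p for p in available_players if p.get('position') == position]
--             if len(position_players) <= 3:
--                 alerts.append(f"Only {len(position_players)} {position}s remaining!")
--
--     return alerts
-- ===== SOURCE B (Python) =====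
-- from typing import Dict, List
--
--
-- def _get_scarcity_alerts(available_players: List[Dict], needs: Dict) -> List[str]:
--     """Alert about position scarcity: one straight-line pass with four scalar
--     counters (no per-position loop), then concatenation of per-position alert
--     singletons built by a helper."""
--     q = r = w = t = 0
--     for p in available_players:
--         pos = p.get('position')
--         if pos == 'QB':
--             q += 1
--         elif pos == 'RB':
--             r += 1
--         elif pos == 'WR':
--             w += 1
--         elif pos == 'TE':
--             t += 1
--
--     def alert(pos, n):
--         if needs.get(pos, 0) > 0 and n <= 3:
--             return [f"Only {n} {pos}s remaining!"]
--         return []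
--
--     return alert('QB', q) + alert('RB', r) + alert('WR', w) + alert('TE', t)
-- ===== Notes on version B (the rewrite author's own statement) =====
-- stated objective: alternative
-- what changed: B makes one pass over available_players accumulating four scalar counters in an if/elif chain (no dict and no loop over positions), then returns the concatenation of four per-position alert singletons produced by a helper, instead of A's loop over the position list with a filter scan of the whole player list per position.
import Mathlib
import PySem

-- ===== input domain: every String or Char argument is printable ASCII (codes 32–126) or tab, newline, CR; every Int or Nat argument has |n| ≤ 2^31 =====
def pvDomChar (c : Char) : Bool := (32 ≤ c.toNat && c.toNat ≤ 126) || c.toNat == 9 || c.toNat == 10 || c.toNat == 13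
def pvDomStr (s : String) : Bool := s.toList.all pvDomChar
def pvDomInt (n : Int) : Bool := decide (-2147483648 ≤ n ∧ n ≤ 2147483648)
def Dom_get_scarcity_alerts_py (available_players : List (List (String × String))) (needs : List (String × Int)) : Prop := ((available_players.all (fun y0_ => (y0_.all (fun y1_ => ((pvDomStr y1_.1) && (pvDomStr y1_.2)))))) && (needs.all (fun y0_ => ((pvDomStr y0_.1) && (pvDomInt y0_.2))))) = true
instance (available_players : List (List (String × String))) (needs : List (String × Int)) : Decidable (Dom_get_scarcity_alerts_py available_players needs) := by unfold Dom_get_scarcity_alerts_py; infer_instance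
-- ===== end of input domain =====

-- B replaces A's loop over positions (each re-filtering the whole player list) by one straight-line
-- pass with four scalar counters and a concatenation of four alert singletons; objective: alternative.

-- ===== PORT A =====
def get_scarcity_alerts_py (available_players : List (List (String × String))) (needs : List (String × Int)) : List String :=
  ["QB", "RB", "WR", "TE"].foldl (fun alerts position =>
    if PySem.Dict.getD (PySem.Dict.mk needs) position 0 > 0 then
      let position_players := available_players.filter (fun p => PySem.Dict.get? (PySem.Dict.mk p) "position" == some position)
      if position_players.length ≤ 3 then
        alerts ++ ["Only " ++ PySem.Int.toStr (position_players.length : Int) ++ " " ++ position ++ "s remaining!"]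
      else alerts
    else alerts) []

-- ===== PORT B =====
-- B's helper `alert`: a singleton alert or nothing for one position.
def pvAlert (needs : List (String × Int)) (pos : String) (n : Int) : List String :=
  if PySem.Dict.getD (PySem.Dict.mk needs) pos 0 > 0 ∧ n ≤ 3 then
    ["Only " ++ PySem.Int.toStr n ++ " " ++ pos ++ "s remaining!"]
  else []

def get_scarcity_alerts_py_alt (available_players : List (List (String × String))) (needs : List (String × Int)) : List String :=
  let s : Int × Int × Int × Int :=
    available_players.foldl (fun s p =>
      let pos := PySem.Dict.get? (PySem.Dict.mk p) "position"
      if pos == some "QB" then (s.1 + 1, s.2.1, s.2.2.1, s.2.2.2)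
      else if pos == some "RB" then (s.1, s.2.1 + 1, s.2.2.1, s.2.2.2)
      else if pos == some "WR" then (s.1, s.2.1, s.2.2.1 + 1, s.2.2.2)
      else if pos == some "TE" then (s.1, s.2.1, s.2.2.1, s.2.2.2 + 1)
      else s) (0, 0, 0, 0)
  pvAlert needs "QB" s.1 ++ pvAlert needs "RB" s.2.1 ++ pvAlert needs "WR" s.2.2.1 ++ pvAlert needs "TE" s.2.2.2

-- ===== PRECONDITION & SPEC =====
def Spec_get_scarcity_alerts_py (available_players : List (List (String × String))) (needs : List (String × Int)) (out : List String) : Prop := out = get_scarcity_alerts_py_alt available_players needs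
instance (available_players : List (List (String × String))) (needs : List (String × Int)) (out : List String) : Decidable (Spec_get_scarcity_alerts_py available_players needs out) := by unfold Spec_get_scarcity_alerts_py; infer_instance

-- ===== CLAIM (what is proved, stated in full; the proofs are below) =====
def Claim_equal_get_scarcity_alerts_py : Prop := ∀ (available_players : List (List (String × String))) (needs : List (String × Int)), Dom_get_scarcity_alerts_py available_players needs → Spec_get_scarcity_alerts_py available_players needs (get_scarcity_alerts_py available_players needs)

-- ===== LEMMAS AND PROOFS =====

-- count of players at a position, as A's filter length
def pvCnt (ap : List (List (String × String))) (pos : String) : Nat :=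
  (ap.filter (fun p => PySem.Dict.get? (PySem.Dict.mk p) "position" == some pos)).length

-- The one-pass four-counter fold computes the four per-position counts.
theorem pv_tally (ap : List (List (String × String))) (s : Int × Int × Int × Int) :
    ap.foldl (fun s p =>
      if PySem.Dict.get? (PySem.Dict.mk p) "position" == some "QB" then (s.1 + 1, s.2.1, s.2.2.1, s.2.2.2)
      else if PySem.Dict.get? (PySem.Dict.mk p) "position" == some "RB" then (s.1, s.2.1 + 1, s.2.2.1, s.2.2.2)
      else if PySem.Dict.get? (PySem.Dict.mk p) "position" == some "WR" then (s.1, s.2.1, s.2.2.1 + 1, s.2.2.2)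
      else if PySem.Dict.get? (PySem.Dict.mk p) "position" == some "TE" then (s.1, s.2.1, s.2.2.1, s.2.2.2 + 1)
      else s) s
    = (s.1 + (pvCnt ap "QB" : Int), s.2.1 + (pvCnt ap "RB" : Int), s.2.2.1 + (pvCnt ap "WR" : Int), s.2.2.2 + (pvCnt ap "TE" : Int)) := by
  induction ap generalizing s with
  | nil => simp [pvCnt]
  | cons p tl ih =>
    simp only [List.foldl_cons]
    by_cases h1 : (PySem.Dict.get? (PySem.Dict.mk p) "position" == some "QB") = true
    · have hx : PySem.Dict.get? (PySem.Dict.mk p) "position" = some "QB" := by simpa using h1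
      rw [if_pos h1, ih]
      simp [hx, pvCnt, Prod.ext_iff]
      omega
    by_cases h2 : (PySem.Dict.get? (PySem.Dict.mk p) "position" == some "RB") = true
    · have hx : PySem.Dict.get? (PySem.Dict.mk p) "position" = some "RB" := by simpa using h2
      rw [if_neg h1, if_pos h2, ih]
      simp [hx, pvCnt, Prod.ext_iff]
      omega
    by_cases h3 : (PySem.Dict.get? (PySem.Dict.mk p) "position" == some "WR") = true
    · have hx : PySem.Dict.get? (PySem.Dict.mk p) "position" = some "WR" := by simpa using h3
      rw [if_neg h1, if_neg h2, if_pos h3, ih]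
      simp [hx, pvCnt, Prod.ext_iff]
      omega
    by_cases h4 : (PySem.Dict.get? (PySem.Dict.mk p) "position" == some "TE") = true
    · have hx : PySem.Dict.get? (PySem.Dict.mk p) "position" = some "TE" := by simpa using h4
      rw [if_neg h1, if_neg h2, if_neg h3, if_pos h4, ih]
      simp [hx, pvCnt, Prod.ext_iff]
      omega
    rw [if_neg h1, if_neg h2, if_neg h3, if_neg h4, ih]
    simp [h1, h2, h3, h4, pvCnt]

-- A's per-position branch equals B's helper applied to the count.
theorem pv_branch (ap : List (List (String × String))) (needs : List (String × Int)) (pos : String) (acc : List String) :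
    (if PySem.Dict.getD (PySem.Dict.mk needs) pos 0 > 0 then
      if (ap.filter (fun p => PySem.Dict.get? (PySem.Dict.mk p) "position" == some pos)).length ≤ 3 then
        acc ++ ["Only " ++ PySem.Int.toStr ((ap.filter (fun p => PySem.Dict.get? (PySem.Dict.mk p) "position" == some pos)).length : Int) ++ " " ++ pos ++ "s remaining!"]
      else acc
    else acc) = acc ++ pvAlert needs pos ((pvCnt ap pos : Int)) := by
  unfold pvAlert pvCnt
  split_ifs <;> simp_all
  omega

-- ===== VERDICT (by name: the statement is the Claim_ definition above) =====
theorem get_scarcity_alerts_py_spec : Claim_equal_get_scarcity_alerts_py := by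
  intro ap needs _
  unfold Spec_get_scarcity_alerts_py get_scarcity_alerts_py get_scarcity_alerts_py_alt
  simp only [List.foldl_cons, List.foldl_nil]
  rw [pv_tally]
  simp only [zero_add]
  rw [pv_branch, pv_branch, pv_branch, pv_branch]
  simp [List.append_assoc]
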